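-- pv_equiv track=rewrite | github.com/carlosgglez/Proyecto_final | analisis_DNA/operations/enz_restriccion.py | find_restriction_sites
-- ===== SOURCE A (Python) =====
-- def find_restriction_sites(dna, enzymes):
--     '''
--     Se crea un diccionario vacío llamado 'sites' donde las claves son los nombres de las enzimas
--     y los valores son listas vacías.
--     '''
--     sites = {enzyme: [] for enzyme in enzymes}
--
--     #Se itera sobre el diccionario 'enzymes'
--     for enzyme, recognition_seq in enzymes.items():
--         # Se busca la primera ocurrencia de la secuencia de reconocimiento de la enzima actual dentro de la secuencia de ADN.
--         pos = dna.find(recognition_seq)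
--
--         # Se inicia un bucle while para buscar todas las ocurrencias de la secuencia de reconocimiento dentro de la secuencia de ADN.
--         while pos != -1:
--             # Se añade la posición de la ocurrencia encontrada al valor correspondiente en el diccionario 'sites'.
--             sites[enzyme].append(pos)
--
--             '''
--             Se realiza una optimización para avanzar la posición de búsqueda más allá de la última ocurrencia encontrada.
--             Esto ayuda a evitar encontrar la misma ocurrencia repetidamente.
--             '''
--             pos = dna.find(recognition_seq, pos + len(recognition_seq))
--
--     #Se devuelve el diccionario 'sites', que contiene las posiciones de todas las ocurrencias de las enzimas
--     return sites
-- ===== SOURCE B (Python) =====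
-- def find_restriction_sites(dna, enzymes):
--     # Two-phase approach: first collect EVERY occurrence of the recognition
--     # sequence, including overlapping ones (advancing by one position), then
--     # select the non-overlapping subset with a separate greedy filter.
--     sites = {}
--     for enzyme, seq in enzymes.items():
--         m = len(seq)
--         hits = []
--         pos = dna.find(seq)
--         while pos != -1:
--             hits.append(pos)
--             pos = dna.find(seq, pos + 1)
--         chosen = []
--         nxt = 0
--         for i in hits:
--             if i >= nxt:
--                 chosen.append(i)
--                 nxt = i + m
--         sites[enzyme] = chosen
--     return sites
-- ===== Notes on version B (the rewrite author's own statement) =====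
-- stated objective: alternative
-- what changed: A's single while loop emits the non-overlapping positions directly by restarting str.find just past each accepted match; B instead first materializes every occurrence including overlapping ones (restarting the search at pos+1) and then picks the non-overlapping subset with a separate greedy left-to-right filter; Pre_ excludes empty recognition sequences, on which A loops forever (dna.find('', pos) returns pos again and again).
import Mathlib
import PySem

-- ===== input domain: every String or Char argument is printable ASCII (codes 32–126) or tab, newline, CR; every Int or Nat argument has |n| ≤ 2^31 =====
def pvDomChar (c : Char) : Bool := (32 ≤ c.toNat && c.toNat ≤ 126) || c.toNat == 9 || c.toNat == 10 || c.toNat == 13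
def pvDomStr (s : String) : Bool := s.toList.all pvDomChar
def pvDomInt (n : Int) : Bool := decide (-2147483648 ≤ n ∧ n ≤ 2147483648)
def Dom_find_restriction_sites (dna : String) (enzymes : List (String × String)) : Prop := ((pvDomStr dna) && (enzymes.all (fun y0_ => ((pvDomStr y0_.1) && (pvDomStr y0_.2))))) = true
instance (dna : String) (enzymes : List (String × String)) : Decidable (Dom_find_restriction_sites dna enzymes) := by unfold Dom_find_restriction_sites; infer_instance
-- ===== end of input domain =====

-- B replaces A's repeated str.find-with-jump loop by materializing all (possibly
-- overlapping) match positions in one scan and then a separate greedy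
-- non-overlap filter; equivalence is proved for nonempty recognition sequences.

-- ===== PORT A =====
-- the 'while pos != -1' loop of A, threading the sites dict ('sites[enzyme].append(pos)');
-- fuel len(dna)+1 is an upper bound on the iteration count for nonempty recognition sequences
def pySitesLoop (s p : List Char) (enzyme : String) :
    Nat → PySem.Dict String (List Int) → Int → PySem.Dict String (List Int)
  | 0, sites, _ => sites
  | fuel + 1, sites, pos =>
    if pos = -1 then sites
    else pySitesLoop s p enzyme fuel
      (sites.insert enzyme (sites.getD enzyme [] ++ [pos]))
      (PySem.Chars.findFrom s p (pos + (p.length : Int)) none)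

def find_restriction_sites (dna : String) (enzymes : List (String × String)) : List (String × List Int) :=
  let d := PySem.Dict.ofList enzymes
  -- sites = {enzyme: [] for enzyme in enzymes}
  let sites0 := d.keys.foldl (fun st e => st.insert e ([] : List Int)) PySem.Dict.empty
  -- for enzyme, recognition_seq in enzymes.items(): pos = dna.find(recognition_seq); while ...
  let sites := d.items.foldl
    (fun st pr => pySitesLoop dna.toList pr.2.toList pr.1 (dna.toList.length + 1) st
      (PySem.Chars.find dna.toList pr.2.toList)) sites0
  sites.items

-- ===== PORT B =====
-- hits = []; pos = dna.find(seq); while pos != -1: hits.append(pos); pos = dna.find(seq, pos + 1)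
-- every occurrence, including overlapping ones; fuel len(dna)+1 bounds the iteration count
def altHitsLoop (s p : List Char) : Nat → Int → List Int
  | 0, _ => []
  | fuel + 1, pos =>
    if pos = -1 then []
    else pos :: altHitsLoop s p fuel (PySem.Chars.findFrom s p (pos + 1) none)

def altHits (s p : List Char) : List Int :=
  altHitsLoop s p (s.length + 1) (PySem.Chars.find s p)

-- chosen = []; nxt = 0; for i in hits: if i >= nxt: chosen.append(i); nxt = i + m
def altNonOverlap (m : Int) (hits : List Int) : List Int :=
  (hits.foldl (fun (st : List Int × Int) i => if st.2 ≤ i then (st.1 ++ [i], i + m) else st)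
    (([] : List Int), 0)).1

def find_restriction_sites_alt (dna : String) (enzymes : List (String × String)) : List (String × List Int) :=
  (PySem.Dict.ofList enzymes).items.map
    (fun pr => (pr.1, altNonOverlap (pr.2.toList.length : Int) (altHits dna.toList pr.2.toList)))

-- ===== PRECONDITION & SPEC =====
-- Pre_ excludes empty recognition sequences: on them A never returns (dna.find('', pos)
-- yields pos forever, an infinite loop). (If a duplicated key's overwritten value is
-- empty this is slightly narrower than necessary; Python's input is a dict, so such
-- duplicates do not arise there.)
def Pre_find_restriction_sites (dna : String) (enzymes : List (String × String)) : Prop :=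
  ∀ pr ∈ enzymes, pr.2 ≠ ""
instance (dna : String) (enzymes : List (String × String)) : Decidable (Pre_find_restriction_sites dna enzymes) := by
  unfold Pre_find_restriction_sites; infer_instance

def pvWitness_find_restriction_sites : String × (List (String × String)) :=
  ("GAATTCGGAATTC", [("EcoRI", "GAATTC"), ("TaqI", "TCGA")])

def Spec_find_restriction_sites (dna : String) (enzymes : List (String × String)) (out : List (String × List Int)) : Prop := out = find_restriction_sites_alt dna enzymes
instance (dna : String) (enzymes : List (String × String)) (out : List (String × List Int)) : Decidable (Spec_find_restriction_sites dna enzymes out) := by unfold Spec_find_restriction_sites; infer_instance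

-- ===== CLAIM (what is proved, stated in full; the proofs are below) =====
def Claim_equal_find_restriction_sites : Prop := ∀ (dna : String) (enzymes : List (String × String)), Dom_find_restriction_sites dna enzymes → Pre_find_restriction_sites dna enzymes → Spec_find_restriction_sites dna enzymes (find_restriction_sites dna enzymes)

-- ===== LEMMAS AND PROOFS =====

-- the set of ALL match positions, characterized directly (proof-side reference list)
def matchPos (s p : List Char) : List Int :=
  (PySem.List.pyRange 0 ((s.length : Int) - (p.length : Int) + 1) 1).filter
    (fun i => PySem.Chars.slice s (some i) (some (i + (p.length : Int))) == p)

-- the positions A's while loop appends, as a plain list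
def pyFindAll (s p : List Char) : Nat → Int → List Int
  | 0, _ => []
  | fuel + 1, pos =>
    if pos = -1 then []
    else pos :: pyFindAll s p fuel (PySem.Chars.findFrom s p (pos + (p.length : Int)) none)

-- B's greedy filter, recursively
def greedyPick (m : Int) : List Int → Int → List Int
  | [], _ => []
  | i :: r, t => if t ≤ i then i :: greedyPick m r (i + m) else greedyPick m r t

lemma foldl_greedy (m : Int) (hits : List Int) :
    ∀ (acc : List Int) (t : Int),
      (hits.foldl (fun (st : List Int × Int) i => if st.2 ≤ i then (st.1 ++ [i], i + m) else st) (acc, t)).1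
        = acc ++ greedyPick m hits t := by
  induction hits with
  | nil => intro acc t; simp [greedyPick]
  | cons i r ih =>
    intro acc t
    by_cases h : t ≤ i
    · simp [List.foldl_cons, h, greedyPick, ih]
    · simp [List.foldl_cons, h, greedyPick, ih]

lemma mem_matchPos (s p : List Char) (hp : p ≠ []) (i : Int) :
    i ∈ matchPos s p ↔ 0 ≤ i ∧ p <+: s.drop i.toNat := by
  have hm : 0 < p.length := List.length_pos_of_ne_nil hp
  unfold matchPos
  rw [List.mem_filter, PySem.List.mem_pyRange_one]
  constructor
  · rintro ⟨⟨h0, hlt⟩, hsl⟩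
    refine ⟨h0, ?_⟩
    rw [beq_iff_eq] at hsl
    rw [show PySem.Chars.slice s (some i) (some (i + (p.length : Int)))
          = PySem.List.slice s (some i) (some (i + (p.length : Int))) from rfl,
        PySem.List.slice_toNat s h0 (by omega)] at hsl
    have : (i + (p.length : Int)).toNat - i.toNat = p.length := by omega
    rw [this] at hsl
    rw [List.prefix_iff_eq_take]
    exact hsl.symm
  · rintro ⟨h0, hpre⟩
    have htake := List.prefix_iff_eq_take.mp hpre
    have hlen : p.length ≤ (s.drop i.toNat).length := hpre.length_le
    rw [List.length_drop] at hlen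
    refine ⟨⟨h0, by omega⟩, ?_⟩
    rw [beq_iff_eq,
        show PySem.Chars.slice s (some i) (some (i + (p.length : Int)))
          = PySem.List.slice s (some i) (some (i + (p.length : Int))) from rfl,
        PySem.List.slice_toNat s h0 (by omega)]
    have : (i + (p.length : Int)).toNat - i.toNat = p.length := by omega
    rw [this]
    exact htake.symm

lemma matchPos_bound (s p : List Char) (hp : p ≠ []) {i : Int} (h : i ∈ matchPos s p) :
    0 ≤ i ∧ i + (p.length : Int) ≤ (s.length : Int) := by
  have hm : 0 < p.length := List.length_pos_of_ne_nil hp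
  obtain ⟨h0, hpre⟩ := (mem_matchPos s p hp i).mp h
  have hlen : p.length ≤ (s.drop i.toNat).length := hpre.length_le
  rw [List.length_drop] at hlen
  omega

lemma matchPos_sorted (s p : List Char) : (matchPos s p).Pairwise (· < ·) := by
  exact List.Pairwise.sublist (List.filter_sublist)
    (PySem.List.pairwise_lt_pyRange_one 0 _)

lemma findFrom_eq_neg_one (s p : List Char) (hp : p ≠ []) (t : Int) (h0 : 0 ≤ t)
    (hn : t ≤ (s.length : Int)) :
    PySem.Chars.findFrom s p t none = -1 ↔ ∀ i ∈ matchPos s p, i < t := by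
  obtain ⟨k, rfl⟩ : ∃ k : Nat, t = (k : Int) := ⟨t.toNat, (Int.toNat_of_nonneg h0).symm⟩
  rw [PySem.Chars.findFrom_natCast_eq_neg_one_iff s p k (by omega)]
  constructor
  · intro hni i hi
    by_contra hlt
    have hle : (k : Int) ≤ i := by omega
    obtain ⟨hi0, hpre⟩ := (mem_matchPos s p hp i).mp hi
    apply hni
    rw [List.infix_iff_prefix_suffix]
    refine ⟨List.drop i.toNat s, hpre, ?_⟩
    have : List.drop i.toNat s = List.drop (i.toNat - k) (List.drop k s) := by
      rw [List.drop_drop]; congr 1; omega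
    rw [this]
    exact List.drop_suffix _ _
  · intro hall hinf
    obtain ⟨u, hpu, hus⟩ := List.infix_iff_prefix_suffix.mp hinf
    have hu := List.suffix_iff_eq_drop.mp hus
    set j := (List.drop k s).length - u.length with hj
    have hpre : p <+: List.drop (k + j) s := by
      rw [← List.drop_drop, ← hu]; exact hpu
    have hmem : ((k + j : Nat) : Int) ∈ matchPos s p := by
      rw [mem_matchPos s p hp]
      refine ⟨by positivity, ?_⟩
      rw [Int.toNat_natCast]
      exact hpre
    have := hall _ hmem
    omega

lemma findFrom_spec' (s p : List Char) (hp : p ≠ []) (t : Int) (h0 : 0 ≤ t)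
    (hn : t ≤ (s.length : Int)) (hne : PySem.Chars.findFrom s p t none ≠ -1) :
    PySem.Chars.findFrom s p t none ∈ matchPos s p ∧ t ≤ PySem.Chars.findFrom s p t none ∧
      ∀ i ∈ matchPos s p, t ≤ i → PySem.Chars.findFrom s p t none ≤ i := by
  obtain ⟨k, rfl⟩ : ∃ k : Nat, t = (k : Int) := ⟨t.toNat, (Int.toNat_of_nonneg h0).symm⟩
  obtain ⟨hge, hpre, hmin⟩ := PySem.Chars.findFrom_natCast_spec s p k (by omega) hne
  refine ⟨?_, hge, ?_⟩
  · rw [mem_matchPos s p hp]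
    exact ⟨by omega, hpre⟩
  · intro i hi hti
    by_contra hlt
    obtain ⟨hi0, hipre⟩ := (mem_matchPos s p hp i).mp hi
    exact hmin i.toNat (by omega) (by omega) hipre

lemma loop_eq_greedy (s p : List Char) (hp : p ≠ []) :
    ∀ (occ : List Int) (fuel : Nat) (t : Int), occ.length < fuel → 0 ≤ t →
      t ≤ (s.length : Int) → occ.Sublist (matchPos s p) →
      (∀ i ∈ matchPos s p, t ≤ i → i ∈ occ) →
      pyFindAll s p fuel (PySem.Chars.findFrom s p t none) = greedyPick (p.length : Int) occ t := by
  have hm : 0 < p.length := List.length_pos_of_ne_nil hp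
  intro occ
  induction occ with
  | nil =>
    intro fuel t hf h0 hn _ hall
    have hneg : PySem.Chars.findFrom s p t none = -1 := by
      rw [findFrom_eq_neg_one s p hp t h0 hn]
      intro i hi
      by_contra hlt
      exact absurd (hall i hi (by omega)) (List.not_mem_nil)
    obtain ⟨f, rfl⟩ : ∃ f, fuel = f + 1 := ⟨fuel - 1, by omega⟩
    simp [pyFindAll, hneg, greedyPick]
  | cons i r ih =>
    intro fuel t hf h0 hn hsub hall
    have hi_mem : i ∈ matchPos s p := hsub.subset List.mem_cons_self
    have hi_b := matchPos_bound s p hp hi_mem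
    obtain ⟨f, rfl⟩ : ∃ f, fuel = f + 1 := ⟨fuel - 1, by omega⟩
    have hsorted : (i :: r).Pairwise (· < ·) :=
      List.Pairwise.sublist hsub (matchPos_sorted s p)
    by_cases hti : t ≤ i
    · have hne : PySem.Chars.findFrom s p t none ≠ -1 := by
        intro h
        have := (findFrom_eq_neg_one s p hp t h0 hn).mp h i hi_mem
        omega
      obtain ⟨hr_mem, hr_ge, hr_min⟩ := findFrom_spec' s p hp t h0 hn hne
      have hr_eq : PySem.Chars.findFrom s p t none = i := by
        have h1 : PySem.Chars.findFrom s p t none ≤ i := hr_min i hi_mem hti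
        rcases List.mem_cons.mp (hall _ hr_mem hr_ge) with h2 | h2
        · exact h2
        · have := (List.pairwise_cons.mp hsorted).1 _ h2
          omega
      rw [hr_eq]
      show (if i = -1 then [] else
        i :: pyFindAll s p f (PySem.Chars.findFrom s p (i + (p.length : Int)) none))
        = greedyPick (p.length : Int) (i :: r) t
      rw [if_neg (by omega)]
      show _ = if t ≤ i then i :: greedyPick (p.length : Int) r (i + (p.length : Int))
        else greedyPick (p.length : Int) r t
      rw [if_pos hti]
      congr 1
      apply ih f (i + (p.length : Int)) (by simp at hf ⊢; omega) (by omega) (by omega)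
        ((List.sublist_cons_self i r).trans hsub)
      intro j hj hje
      rcases List.mem_cons.mp (hall j hj (by omega)) with h | h
      · exfalso; omega
      · exact h
    · show _ = if t ≤ i then i :: greedyPick (p.length : Int) r (i + (p.length : Int))
        else greedyPick (p.length : Int) r t
      rw [if_neg hti]
      apply ih (f + 1) t (by simp at hf ⊢; omega) h0 hn
        ((List.sublist_cons_self i r).trans hsub)
      intro j hj hje
      rcases List.mem_cons.mp (hall j hj hje) with h | h
      · exfalso; omega
      · exact h

-- B's hits loop enumerates exactly the reference list of all match positions
lemma hitsLoop_eq (s p : List Char) (hp : p ≠ []) :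
    ∀ (occ : List Int) (fuel : Nat) (t : Int), occ.length < fuel → 0 ≤ t →
      t ≤ (s.length : Int) → occ.Sublist (matchPos s p) →
      (∀ i ∈ matchPos s p, t ≤ i → i ∈ occ) → (∀ i ∈ occ, t ≤ i) →
      altHitsLoop s p fuel (PySem.Chars.findFrom s p t none) = occ := by
  have hm : 0 < p.length := List.length_pos_of_ne_nil hp
  intro occ
  induction occ with
  | nil =>
    intro fuel t hf h0 hn _ hall _
    have hneg : PySem.Chars.findFrom s p t none = -1 := by
      rw [findFrom_eq_neg_one s p hp t h0 hn]
      intro i hi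
      by_contra hlt
      exact absurd (hall i hi (by omega)) (List.not_mem_nil)
    obtain ⟨f, rfl⟩ : ∃ f, fuel = f + 1 := ⟨fuel - 1, by omega⟩
    simp [altHitsLoop, hneg]
  | cons i r ih =>
    intro fuel t hf h0 hn hsub hall hge
    have hi_mem : i ∈ matchPos s p := hsub.subset List.mem_cons_self
    have hti : t ≤ i := hge i List.mem_cons_self
    have hi_b := matchPos_bound s p hp hi_mem
    obtain ⟨f, rfl⟩ : ∃ f, fuel = f + 1 := ⟨fuel - 1, by omega⟩
    have hsorted : (i :: r).Pairwise (· < ·) :=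
      List.Pairwise.sublist hsub (matchPos_sorted s p)
    have hne : PySem.Chars.findFrom s p t none ≠ -1 := by
      intro h
      have := (findFrom_eq_neg_one s p hp t h0 hn).mp h i hi_mem
      omega
    obtain ⟨hr_mem, hr_ge, hr_min⟩ := findFrom_spec' s p hp t h0 hn hne
    have hr_eq : PySem.Chars.findFrom s p t none = i := by
      have h1 : PySem.Chars.findFrom s p t none ≤ i := hr_min i hi_mem hti
      rcases List.mem_cons.mp (hall _ hr_mem hr_ge) with h2 | h2
      · exact h2
      · have := (List.pairwise_cons.mp hsorted).1 _ h2
        omega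
    rw [hr_eq]
    show (if i = -1 then [] else
      i :: altHitsLoop s p f (PySem.Chars.findFrom s p (i + 1) none)) = i :: r
    rw [if_neg (by omega)]
    congr 1
    apply ih f (i + 1) (by simp at hf ⊢; omega) (by omega) (by omega)
      ((List.sublist_cons_self i r).trans hsub)
    · intro j hj hje
      rcases List.mem_cons.mp (hall j hj (by omega)) with h | h
      · exfalso; omega
      · exact h
    · intro j hj
      have := (List.pairwise_cons.mp hsorted).1 _ hj
      omega

lemma altHits_eq (s p : List Char) (hp : p ≠ []) : altHits s p = matchPos s p := by
  have hm : 0 < p.length := List.length_pos_of_ne_nil hp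
  unfold altHits
  rw [← PySem.Chars.findFrom_zero s p]
  apply hitsLoop_eq s p hp (matchPos s p) (s.length + 1) 0
  · have h1 : (matchPos s p).length
        ≤ (PySem.List.pyRange 0 ((s.length : Int) - (p.length : Int) + 1) 1).length :=
      List.length_filter_le _ _
    rw [PySem.List.length_pyRange_one] at h1
    omega
  · omega
  · omega
  · exact List.Sublist.refl _
  · intro j hj _; exact hj
  · intro j hj; exact ((mem_matchPos s p hp j).mp hj).1

-- the per-sequence core: A's find loop = B's overlapping-hits loop + greedy filter
lemma perSeq (s p : List Char) (hp : p ≠ []) :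
    pyFindAll s p (s.length + 1) (PySem.Chars.find s p)
      = altNonOverlap (p.length : Int) (altHits s p) := by
  have hm : 0 < p.length := List.length_pos_of_ne_nil hp
  rw [altHits_eq s p hp]
  unfold altNonOverlap
  rw [foldl_greedy, List.nil_append]
  rw [← PySem.Chars.findFrom_zero s p]
  apply loop_eq_greedy s p hp (matchPos s p) (s.length + 1) 0
  · have h1 : (matchPos s p).length
        ≤ (PySem.List.pyRange 0 ((s.length : Int) - (p.length : Int) + 1) 1).length :=
      List.length_filter_le _ _
    rw [PySem.List.length_pyRange_one] at h1
    omega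
  · omega
  · omega
  · exact List.Sublist.refl _
  · intro j hj _; exact hj

-- dict plumbing --------------------------------------------------------------

lemma insert_getD_self (st : PySem.Dict String (List Int)) (e : String)
    (hc : st.contains e = true) (hnd : st.keys.Nodup) :
    st.insert e (st.getD e []) = st := by
  apply PySem.Dict.ext
  rw [PySem.Dict.items_insert_of_contains st _ hc]
  have h : ∀ pr ∈ st.items,
      (if (pr.1 == e) = true then (e, st.getD e []) else pr) = id pr := by
    intro pr hpr
    by_cases he : pr.1 = e
    · have : st.getD e [] = pr.2 := by
        have : (pr.1, pr.2) ∈ st.items := hpr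
        rw [← he]
        exact PySem.Dict.getD_of_mem_items st this hnd []
      simp [he, this, Prod.ext_iff]
    · simp [he]
  rw [List.map_congr_left h, List.map_id]

lemma getD_pySitesLoop_of_ne (s p : List Char) (e k : String) (hk : k ≠ e) :
    ∀ (fuel : Nat) (st : PySem.Dict String (List Int)) (pos : Int),
      (pySitesLoop s p e fuel st pos).getD k [] = st.getD k [] := by
  intro fuel
  induction fuel with
  | zero => intro st pos; rfl
  | succ f ihf =>
    intro st pos
    show (if pos = -1 then st else _).getD k [] = _
    by_cases hpos : pos = -1
    · rw [if_pos hpos]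
    · rw [if_neg hpos]
      show (pySitesLoop s p e f _ _).getD k [] = _
      rw [ihf, PySem.Dict.getD_insert_of_ne _ _ _ hk]

lemma keys_pySitesLoop (s p : List Char) (e : String) :
    ∀ (fuel : Nat) (st : PySem.Dict String (List Int)) (pos : Int),
      st.contains e = true → (pySitesLoop s p e fuel st pos).keys = st.keys := by
  intro fuel
  induction fuel with
  | zero => intro st pos _; rfl
  | succ f ihf =>
    intro st pos hc
    show (if pos = -1 then st else _).keys = _
    by_cases hpos : pos = -1
    · rw [if_pos hpos]
    · rw [if_neg hpos]
      show (pySitesLoop s p e f _ _).keys = _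
      rw [ihf _ _ (PySem.Dict.contains_insert_self st e _),
          PySem.Dict.keys_insert_of_contains st _ hc]

lemma pySitesLoop_eq_insert (s p : List Char) (e : String) :
    ∀ (fuel : Nat) (st : PySem.Dict String (List Int)) (pos : Int),
      st.contains e = true → st.keys.Nodup →
      pySitesLoop s p e fuel st pos = st.insert e (st.getD e [] ++ pyFindAll s p fuel pos) := by
  intro fuel
  induction fuel with
  | zero =>
    intro st pos hc hnd
    show st = st.insert e (st.getD e [] ++ [])
    rw [List.append_nil, insert_getD_self st e hc hnd]
  | succ f ihf =>
    intro st pos hc hnd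
    by_cases hpos : pos = -1
    · show (if pos = -1 then st else _) = st.insert e (st.getD e [] ++ pyFindAll s p (f+1) pos)
      rw [if_pos hpos]
      show st = st.insert e (st.getD e [] ++ (if pos = -1 then [] else _))
      rw [if_pos hpos, List.append_nil, insert_getD_self st e hc hnd]
    · show (if pos = -1 then st else _) = st.insert e (st.getD e [] ++ pyFindAll s p (f+1) pos)
      rw [if_neg hpos]
      show pySitesLoop s p e f (st.insert e (st.getD e [] ++ [pos])) _
          = st.insert e (st.getD e [] ++ pyFindAll s p (f+1) pos)
      rw [ihf _ _ (PySem.Dict.contains_insert_self st e _)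
            (PySem.Dict.nodup_keys_insert st e _ hnd),
          PySem.Dict.getD_insert_self, PySem.Dict.insert_insert_self]
      show _ = st.insert e (st.getD e [] ++ (if pos = -1 then [] else pos :: _))
      rw [if_neg hpos, List.append_assoc]
      rfl

-- the outer fold over enzymes.items() ---------------------------------------

def outerF (dna : String) : PySem.Dict String (List Int) → (String × String) → PySem.Dict String (List Int) :=
  fun st pr => pySitesLoop dna.toList pr.2.toList pr.1 (dna.toList.length + 1) st
    (PySem.Chars.find dna.toList pr.2.toList)

lemma keys_foldF (dna : String) (l : List (String × String)) :
    ∀ (st : PySem.Dict String (List Int)), (∀ pr ∈ l, st.contains pr.1 = true) →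
      (l.foldl (outerF dna) st).keys = st.keys := by
  induction l with
  | nil => intro st _; rfl
  | cons pr rest ih =>
    intro st hc
    show (rest.foldl (outerF dna) (outerF dna st pr)).keys = st.keys
    have hk1 : (outerF dna st pr).keys = st.keys :=
      keys_pySitesLoop _ _ _ _ _ _ (hc pr List.mem_cons_self)
    rw [ih _ (by
      intro q hq
      rw [PySem.Dict.contains_iff_mem_keys, hk1, ← PySem.Dict.contains_iff_mem_keys]
      exact hc q (List.mem_cons_of_mem pr hq)), hk1]

lemma getD_foldF_of_not_mem (dna : String) (l : List (String × String)) (k : String)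
    (hk : k ∉ l.map (·.1)) :
    ∀ (st : PySem.Dict String (List Int)), (l.foldl (outerF dna) st).getD k [] = st.getD k [] := by
  induction l with
  | nil => intro st; rfl
  | cons pr rest ih =>
    intro st
    show (rest.foldl (outerF dna) (outerF dna st pr)).getD k [] = st.getD k []
    have hk1 : k ∉ rest.map (·.1) := fun h => hk (List.mem_cons_of_mem _ h)
    have hk2 : k ≠ pr.1 := fun h => hk (by rw [h]; exact List.mem_map_of_mem List.mem_cons_self)
    rw [ih hk1]
    show (pySitesLoop dna.toList pr.2.toList pr.1 (dna.toList.length + 1) st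
      (PySem.Chars.find dna.toList pr.2.toList)).getD k [] = st.getD k []
    rw [getD_pySitesLoop_of_ne _ _ _ _ hk2]

lemma getD_foldF (dna : String) (l : List (String × String)) :
    ∀ (st : PySem.Dict String (List Int)) (k : String) (v : String),
      (l.map (·.1)).Nodup → (∀ pr ∈ l, st.contains pr.1 = true) → st.keys.Nodup →
      (k, v) ∈ l → st.getD k [] = [] →
      (l.foldl (outerF dna) st).getD k []
        = pyFindAll dna.toList v.toList (dna.toList.length + 1) (PySem.Chars.find dna.toList v.toList) := by
  induction l with
  | nil => intro st k v _ _ _ hmem _; exact absurd hmem (List.not_mem_nil)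
  | cons pr rest ih =>
    intro st k v hnodup hc hnd hmem hget
    have hcpr : st.contains pr.1 = true := hc pr List.mem_cons_self
    have hkeys1 : (outerF dna st pr).keys = st.keys := keys_pySitesLoop _ _ _ _ _ _ hcpr
    have hnd1 : (outerF dna st pr).keys.Nodup := hkeys1 ▸ hnd
    have hc1 : ∀ q ∈ rest, (outerF dna st pr).contains q.1 = true := by
      intro q hq
      rw [PySem.Dict.contains_iff_mem_keys, hkeys1, ← PySem.Dict.contains_iff_mem_keys]
      exact hc q (List.mem_cons_of_mem pr hq)
    have hnodup1 : (rest.map (·.1)).Nodup := (List.nodup_cons.mp hnodup).2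
    show (rest.foldl (outerF dna) (outerF dna st pr)).getD k [] = _
    by_cases hk : k = pr.1
    · subst hk
      have hv : v = pr.2 := by
        rcases List.mem_cons.mp hmem with h | h
        · exact congrArg Prod.snd h
        · exact absurd (List.mem_map_of_mem h : (pr.1, v).1 ∈ rest.map (·.1))
            (List.nodup_cons.mp hnodup).1
      have hnmem : pr.1 ∉ rest.map (·.1) := (List.nodup_cons.mp hnodup).1
      rw [getD_foldF_of_not_mem dna rest pr.1 hnmem]
      show (pySitesLoop dna.toList pr.2.toList pr.1 (dna.toList.length + 1) st
        (PySem.Chars.find dna.toList pr.2.toList)).getD pr.1 [] = _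
      rw [pySitesLoop_eq_insert _ _ _ _ _ _ hcpr hnd, PySem.Dict.getD_insert_self,
          hget, List.nil_append, hv]
    · have hmem1 : (k, v) ∈ rest := by
        rcases List.mem_cons.mp hmem with h | h
        · exact absurd (congrArg Prod.fst h) hk
        · exact h
      have hget1 : (outerF dna st pr).getD k [] = [] := by
        show (pySitesLoop dna.toList pr.2.toList pr.1 (dna.toList.length + 1) st
          (PySem.Chars.find dna.toList pr.2.toList)).getD k [] = []
        rw [getD_pySitesLoop_of_ne _ _ _ _ hk, hget]
      exact ih _ k v hnodup1 hc1 hnd1 hmem1 hget1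

-- sites0 ---------------------------------------------------------------------

lemma getD_sites0 (l : List String) (k : String) :
    ∀ (st : PySem.Dict String (List Int)), st.getD k [] = [] →
      (l.foldl (fun st e => st.insert e ([] : List Int)) st).getD k [] = [] := by
  induction l with
  | nil => intro st h; exact h
  | cons e rest ih =>
    intro st h
    show (rest.foldl _ (st.insert e [])).getD k [] = []
    apply ih
    by_cases hk : k = e
    · subst hk; exact PySem.Dict.getD_insert_self st k [] []
    · rw [PySem.Dict.getD_insert_of_ne _ _ _ hk, h]

lemma keys_sites0 (l : List String) (hl : l.Nodup) :
    ((l.foldl (fun st e => st.insert e ([] : List Int)) (PySem.Dict.empty : PySem.Dict String (List Int))).keys) = l := by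
  rw [PySem.Dict.keys_foldl_insert l (fun _ _ => ([] : List Int)) PySem.Dict.empty,
      PySem.Dict.keys_empty, PySem.Set.update_nil_left,
      PySem.Set.ofList_eq_self_of_nodup l hl]

-- values of dict(pairs) come from the pairs ----------------------------------

lemma mem_items_ofList (l : List (String × String)) {pr : String × String}
    (h : pr ∈ (PySem.Dict.ofList l).items) : ∃ q ∈ l, pr.2 = q.2 := by
  have key : ∀ (l : List (String × String)) (d : PySem.Dict String String),
      pr ∈ (l.foldl (fun d q => d.insert q.1 q.2) d).items →
      pr ∈ d.items ∨ ∃ q ∈ l, pr.2 = q.2 := by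
    intro l
    induction l with
    | nil => intro d h; exact Or.inl h
    | cons q rest ih =>
      intro d h
      rcases ih _ h with h1 | ⟨w, hw, he⟩
      · rcases (PySem.Dict.mem_items_insert d q.1 q.2 pr).mp h1 with h2 | ⟨h2, _⟩
        · exact Or.inr ⟨q, List.mem_cons_self, congrArg Prod.snd h2⟩
        · exact Or.inl h2
      · exact Or.inr ⟨w, List.mem_cons_of_mem q hw, he⟩
  rcases key l PySem.Dict.empty h with h1 | h2
  · exact absurd h1 (List.not_mem_nil)
  · exact h2

lemma ne_empty_toList {q : String} (h : q ≠ "") : q.toList ≠ [] := by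
  simp_all

-- ===== VERDICT (by name: the statement is the Claim_ definition above) =====
theorem find_restriction_sites_spec : Claim_equal_find_restriction_sites := by
  intro dna enzymes _ hpre
  unfold Spec_find_restriction_sites find_restriction_sites find_restriction_sites_alt
  have hnd : (PySem.Dict.ofList enzymes).keys.Nodup := PySem.Dict.nodup_keys_ofList enzymes
  set d := PySem.Dict.ofList enzymes with hd
  set sites0 := d.keys.foldl (fun st e => st.insert e ([] : List Int))
    (PySem.Dict.empty : PySem.Dict String (List Int)) with hs0
  have hkeys0 : sites0.keys = d.keys := keys_sites0 d.keys hnd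
  have hcont0 : ∀ pr ∈ d.items, sites0.contains pr.1 = true := by
    intro pr hpr
    rw [PySem.Dict.contains_iff_mem_keys, hkeys0]
    exact PySem.Dict.mem_keys_of_mem_items d hpr
  have hnd0 : sites0.keys.Nodup := hkeys0 ▸ hnd
  have hfold : (fun st (pr : String × String) =>
      pySitesLoop dna.toList pr.2.toList pr.1 (dna.toList.length + 1) st
        (PySem.Chars.find dna.toList pr.2.toList)) = outerF dna := rfl
  rw [hfold]
  set sites := d.items.foldl (outerF dna) sites0 with hsites
  have hkeysS : sites.keys = d.keys := by
    rw [hsites, keys_foldF dna d.items sites0 hcont0, hkeys0]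
  have hndS : sites.keys.Nodup := hkeysS ▸ hnd
  have hndfst : (d.items.map (·.1)).Nodup := hnd
  rw [PySem.Dict.items_eq_map_keys sites hndS ([] : List Int), hkeysS]
  have hkeq : d.keys = d.items.map (·.1) := rfl
  rw [hkeq, List.map_map]
  apply List.map_congr_left
  intro pr hpr
  have hmem : (pr.1, pr.2) ∈ d.items := hpr
  have hne : pr.2.toList ≠ [] := by
    obtain ⟨q, hq, he⟩ := mem_items_ofList enzymes hpr
    rw [he]
    exact ne_empty_toList (hpre q hq)
  have hgd : sites.getD pr.1 [] = pyFindAll dna.toList pr.2.toList (dna.toList.length + 1)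
      (PySem.Chars.find dna.toList pr.2.toList) :=
    getD_foldF dna d.items sites0 pr.1 pr.2 hndfst hcont0 hnd0 hmem
      (getD_sites0 d.keys pr.1 PySem.Dict.empty (PySem.Dict.getD_empty pr.1 []))
  show (pr.1, sites.getD pr.1 []) = (pr.1, altNonOverlap (pr.2.toList.length : Int)
    (altHits dna.toList pr.2.toList))
  rw [hgd, perSeq dna.toList pr.2.toList hne]
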